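-- pv_equiv track=rewrite | github.com/ren-jamie11/poker_gui | atom_funcs.py | one_card_straightdraw
-- ===== SOURCE A (Python) =====
-- def one_card_straightdraw(int_list):
--     if len(int_list) != len(set(int_list)):
--         return []
--
--     int_list = sorted(int_list)
--     possible_ints = set()
--
--     # Determine the range for the starting points
--     min_val = min(int_list) - 3
--     max_val = max(int_list)
--
--     # Check sequences starting from min_val to max_val
--     for start in range(min_val, max_val + 1):
--         consecutive_set = set(range(start, start + 5))
--
--         for i in range(start, start + 5):
--             potential_set = consecutive_set - {i}
--             # Check if the original list plus one potential integer is a subset of potential_set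
--             if len(int_list) == 3 and set(int_list).issubset(potential_set):
--                 for num in consecutive_set:
--                     if num not in int_list:
--                         if num <= 14:
--                             possible_ints.add(num)
--
--     return sorted(possible_ints)
-- ===== SOURCE B (Python) =====
-- def one_card_straightdraw(int_list):
--     # A card n completes the 3-card straight draw iff some 5-window contains
--     # all three cards and n; the union of those windows is [hi-4, lo+4].
--     if len(int_list) != 3:
--         return []
--     s = set(int_list)
--     if len(s) != 3:
--         return []
--     lo, hi = min(s), max(s)
--     if hi - lo > 4:
--         return []
--     return [n for n in range(hi - 4, lo + 5) if n not in s and n <= 14]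
-- ===== Notes on version B (the rewrite author's own statement) =====
-- stated objective: faster
-- what changed: Replaced the scan over every window start in [min-3, max] with nested window/removal/fill loops and a result set by a closed-form interval: after rejecting duplicates, non-3-length lists and span > 4, the answers are exactly the integers in [max-4, min+4] that are not among the cards and are <= 14, emitted directly in sorted order.
-- outside the precondition, e.g. on one_card_straightdraw([]): A raises ValueError, B returns []
import Mathlib
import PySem

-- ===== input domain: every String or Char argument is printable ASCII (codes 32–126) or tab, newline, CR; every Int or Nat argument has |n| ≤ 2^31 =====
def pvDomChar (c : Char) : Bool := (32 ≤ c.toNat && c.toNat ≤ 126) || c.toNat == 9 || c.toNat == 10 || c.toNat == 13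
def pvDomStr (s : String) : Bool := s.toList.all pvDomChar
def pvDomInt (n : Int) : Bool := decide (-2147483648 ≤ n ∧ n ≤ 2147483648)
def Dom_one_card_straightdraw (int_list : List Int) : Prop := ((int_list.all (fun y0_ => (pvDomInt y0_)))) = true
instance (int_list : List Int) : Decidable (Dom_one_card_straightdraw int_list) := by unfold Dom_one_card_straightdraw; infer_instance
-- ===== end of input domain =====

-- B replaces A's scan over every window start in [min-3, max] by the closed-form
-- answer interval [max-4, min+4] (after rejecting duplicates, non-3 lengths and span > 4): asymptotically faster.


-- ===== PORT A =====
def one_card_straightdraw (int_list : List Int) : List Int :=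
  if int_list.length ≠ (PySem.Set.ofList int_list).length then []
  else
    let l := PySem.List.sorted int_list (fun x => x) false
    -- min()/max() raise on the empty list: excluded by Pre_
    let min_val := (PySem.List.min? l (fun x => x)).getD 0 - 3
    let max_val := (PySem.List.max? l (fun x => x)).getD 0
    let possible : PySem.Set Int :=
      (PySem.List.pyRange min_val (max_val + 1) 1).foldl (fun acc start =>
        let consecutive : PySem.Set Int := PySem.Set.ofList (PySem.List.pyRange start (start + 5) 1)
        (PySem.List.pyRange start (start + 5) 1).foldl (fun acc i =>
          let potential := PySem.Set.diff consecutive [i]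
          if l.length == 3 && PySem.Set.issubset (PySem.Set.ofList l) potential then
            -- 'for num in consecutive_set': consumed only to build another set (order-independent)
            consecutive.foldl (fun acc num =>
              if !(l.contains num) then
                if num ≤ 14 then PySem.Set.add acc num else acc
              else acc) acc
          else acc) acc)
        PySem.Set.empty
    PySem.List.sorted possible (fun x => x) false

-- ===== PORT B =====
def one_card_straightdraw_alt (int_list : List Int) : List Int :=
  if int_list.length ≠ 3 then []
  else
    let s := PySem.Set.ofList int_list
    if s.length ≠ 3 then []
    else
      let lo := (PySem.List.min? s (fun x => x)).getD 0
      let hi := (PySem.List.max? s (fun x => x)).getD 0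
      if hi - lo > 4 then []
      else (PySem.List.pyRange (hi - 4) (lo + 5) 1).filter
             (fun n => !(PySem.Set.contains s n) && decide (n ≤ 14))

-- ===== PRECONDITION & SPEC =====
-- A raises ValueError on the empty list (min() of an empty sequence); excluded here, B returns [] there.
def Pre_one_card_straightdraw (int_list : List Int) : Prop := int_list ≠ []
instance (int_list : List Int) : Decidable (Pre_one_card_straightdraw int_list) := by
  unfold Pre_one_card_straightdraw; infer_instance
def pvWitness_one_card_straightdraw : List Int := [2, 3, 4]

def Spec_one_card_straightdraw (int_list : List Int) (out : List Int) : Prop := out = one_card_straightdraw_alt int_list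
instance (int_list : List Int) (out : List Int) : Decidable (Spec_one_card_straightdraw int_list out) := by unfold Spec_one_card_straightdraw; infer_instance

-- ===== CLAIM (what is proved, stated in full; the proofs are below) =====
def Claim_equal_one_card_straightdraw : Prop := ∀ (int_list : List Int), Dom_one_card_straightdraw int_list → Pre_one_card_straightdraw int_list → Spec_one_card_straightdraw int_list (one_card_straightdraw int_list)

-- ===== LEMMAS AND PROOFS =====

theorem pv_mem_foldl_set {α : Type} (f : PySem.Set Int → α → PySem.Set Int) (Q : α → Int → Prop)
    (hf : ∀ acc x n, n ∈ f acc x ↔ n ∈ acc ∨ Q x n) :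
    ∀ (l : List α) (acc : PySem.Set Int) (n : Int),
      n ∈ l.foldl f acc ↔ n ∈ acc ∨ ∃ x ∈ l, Q x n := by
  intro l
  induction l with
  | nil => simp
  | cons x t ih =>
    intro acc n
    simp only [List.foldl_cons, ih, hf, List.mem_cons]
    constructor
    · rintro ((h | h) | ⟨y, hy, hQ⟩)
      · exact Or.inl h
      · exact Or.inr ⟨x, Or.inl rfl, h⟩
      · exact Or.inr ⟨y, Or.inr hy, hQ⟩
    · rintro (h | ⟨y, (rfl | hy), hQ⟩)
      · exact Or.inl (Or.inl h)
      · exact Or.inl (Or.inr hQ)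
      · exact Or.inr ⟨y, hy, hQ⟩

theorem pv_mem_inner (l : List Int) (w : List Int) (acc : PySem.Set Int) (n : Int) :
    n ∈ w.foldl (fun acc num =>
        if !(l.contains num) then
          if num ≤ 14 then PySem.Set.add acc num else acc
        else acc) acc
    ↔ n ∈ acc ∨ (n ∈ w ∧ n ∉ l ∧ n ≤ 14) := by
  rw [pv_mem_foldl_set _ (fun num n => n = num ∧ num ∉ l ∧ num ≤ 14)]
  · constructor
    · rintro (h | ⟨num, hnum, rfl, h2, h3⟩)
      · exact Or.inl h
      · exact Or.inr ⟨hnum, h2, h3⟩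
    · rintro (h | ⟨h1, h2, h3⟩)
      · exact Or.inl h
      · exact Or.inr ⟨n, h1, rfl, h2, h3⟩
  · intro acc num m
    split_ifs with h1 h2 <;> simp_all [PySem.Set.mem_add]

theorem pv_cond_iff (a b c start i : Int) (hab : a < b) (hbc : b < c) :
    ((([a,b,c] : List Int).length == 3 &&
      PySem.Set.issubset (PySem.Set.ofList [a,b,c])
        (PySem.Set.diff (PySem.Set.ofList (PySem.List.pyRange start (start+5) 1)) [i])) = true)
    ↔ (start ≤ a ∧ c < start + 5 ∧ ¬(i = a ∨ i = b ∨ i = c)) := by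
  simp [PySem.Set.issubset_iff, PySem.Set.mem_diff, PySem.Set.mem_ofList,
        PySem.List.mem_pyRange_one]
  omega

theorem pv_exists_i (a b c start : Int) (hab : a < b) (hbc : b < c)
    (h1 : start ≤ a) (h2 : c < start + 5) :
    ∃ i, (start ≤ i ∧ i < start + 5) ∧ ¬(i = a ∨ i = b ∨ i = c) := by
  by_cases k0 : start = a ∨ start = b ∨ start = c
  · by_cases k1 : start+1 = a ∨ start+1 = b ∨ start+1 = c
    · by_cases k2 : start+2 = a ∨ start+2 = b ∨ start+2 = c
      · by_cases k3 : start+3 = a ∨ start+3 = b ∨ start+3 = c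
        · exfalso; omega
        · exact ⟨start+3, ⟨by omega, by omega⟩, k3⟩
      · exact ⟨start+2, ⟨by omega, by omega⟩, k2⟩
    · exact ⟨start+1, ⟨by omega, by omega⟩, k1⟩
  · exact ⟨start, ⟨by omega, by omega⟩, k0⟩

theorem pv_mem_possible (a b c lo hi n : Int) (hab : a < b) (hbc : b < c) :
    (n ∈ (PySem.List.pyRange lo hi 1).foldl (fun acc start =>
        let consecutive : PySem.Set Int := PySem.Set.ofList (PySem.List.pyRange start (start + 5) 1)
        (PySem.List.pyRange start (start + 5) 1).foldl (fun acc i =>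
          let potential := PySem.Set.diff consecutive [i]
          if ([a,b,c] : List Int).length == 3 && PySem.Set.issubset (PySem.Set.ofList [a,b,c]) potential then
            consecutive.foldl (fun acc num =>
              if !(([a,b,c] : List Int).contains num) then
                if num ≤ 14 then PySem.Set.add acc num else acc
              else acc) acc
          else acc) acc) PySem.Set.empty)
    ↔ ∃ start, (lo ≤ start ∧ start < hi) ∧ (start ≤ a ∧ c < start + 5) ∧
        (start ≤ n ∧ n < start + 5 ∧ ¬(n = a ∨ n = b ∨ n = c) ∧ n ≤ 14) := by
  have hmid : ∀ (start : Int) (acc : PySem.Set Int) (m : Int),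
      (m ∈ (PySem.List.pyRange start (start + 5) 1).foldl (fun acc i =>
          if ([a,b,c] : List Int).length == 3 && PySem.Set.issubset (PySem.Set.ofList [a,b,c])
              (PySem.Set.diff (PySem.Set.ofList (PySem.List.pyRange start (start + 5) 1)) [i]) then
            (PySem.Set.ofList (PySem.List.pyRange start (start + 5) 1)).foldl (fun acc num =>
              if !(([a,b,c] : List Int).contains num) then
                if num ≤ 14 then PySem.Set.add acc num else acc
              else acc) acc
          else acc) acc)
      ↔ m ∈ acc ∨ ((start ≤ a ∧ c < start + 5) ∧
          (start ≤ m ∧ m < start + 5 ∧ ¬(m = a ∨ m = b ∨ m = c) ∧ m ≤ 14)) := by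
    intro start acc m
    rw [pv_mem_foldl_set _ (fun i m =>
        (start ≤ a ∧ c < start + 5 ∧ ¬(i = a ∨ i = b ∨ i = c)) ∧
        (start ≤ m ∧ m < start + 5 ∧ ¬(m = a ∨ m = b ∨ m = c) ∧ m ≤ 14))]
    · constructor
      · rintro (h | ⟨i, hi, ⟨g1, g2, _⟩, g4⟩)
        · exact Or.inl h
        · exact Or.inr ⟨⟨g1, g2⟩, g4⟩
      · rintro (h | ⟨⟨g1, g2⟩, g4⟩)
        · exact Or.inl h
        · obtain ⟨i, hiw, hni⟩ := pv_exists_i a b c start hab hbc g1 g2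
          exact Or.inr ⟨i, (PySem.List.mem_pyRange_one).2 hiw, ⟨g1, g2, hni⟩, g4⟩
    · intro acc i m
      by_cases hc : (([a,b,c] : List Int).length == 3 &&
          PySem.Set.issubset (PySem.Set.ofList [a,b,c])
            (PySem.Set.diff (PySem.Set.ofList (PySem.List.pyRange start (start + 5) 1)) [i])) = true
      · rw [if_pos hc, pv_mem_inner]
        rw [pv_cond_iff a b c start i hab hbc] at hc
        simp only [PySem.Set.mem_ofList, PySem.List.mem_pyRange_one]
        constructor
        · rintro (h | ⟨h1, h2, h3⟩)
          · exact Or.inl h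
          · exact Or.inr ⟨⟨hc.1, hc.2.1, hc.2.2⟩, h1.1, h1.2, by simpa using h2, h3⟩
        · rintro (h | ⟨_, g1, g2, g3, g4⟩)
          · exact Or.inl h
          · exact Or.inr ⟨⟨g1, g2⟩, by simpa using g3, g4⟩
      · rw [if_neg hc]
        rw [pv_cond_iff a b c start i hab hbc] at hc
        constructor
        · exact Or.inl
        · rintro (h | ⟨⟨g1, g2, g3⟩, _⟩)
          · exact h
          · exact absurd ⟨g1, g2, g3⟩ hc
  rw [pv_mem_foldl_set _ (fun start m =>
      (start ≤ a ∧ c < start + 5) ∧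
      (start ≤ m ∧ m < start + 5 ∧ ¬(m = a ∨ m = b ∨ m = c) ∧ m ≤ 14))
      (fun acc start m => hmid start acc m)]
  simp only [PySem.Set.empty, List.not_mem_nil, false_or, PySem.List.mem_pyRange_one]

-- min/max of any list whose members are exactly {a, b, c} with a < b < c
theorem pv_min_getD {a b c : Int} (xs : List Int) (hmem : ∀ y, y ∈ xs ↔ y = a ∨ y = b ∨ y = c)
    (hab : a < b) (hbc : b < c) : (PySem.List.min? xs (fun x => x)).getD 0 = a := by
  have hne : xs ≠ [] := by
    intro h; subst h; exact absurd ((hmem a).2 (Or.inl rfl)) (by simp)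
  obtain ⟨m, hm⟩ : ∃ m, PySem.List.min? xs (fun x => x) = some m := by
    rcases h : PySem.List.min? xs (fun x => x) with _ | m
    · exact absurd ((PySem.List.min?_eq_none_iff _ _).1 h) hne
    · exact ⟨m, rfl⟩
  have hmmem := PySem.List.min?_mem hm
  have hmin := PySem.List.min?_isMin hm
  have hma := hmin a ((hmem a).2 (Or.inl rfl))
  rcases (hmem m).1 hmmem with rfl | rfl | rfl <;> simp [hm] <;> omega

theorem pv_max_getD {a b c : Int} (xs : List Int) (hmem : ∀ y, y ∈ xs ↔ y = a ∨ y = b ∨ y = c)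
    (hab : a < b) (hbc : b < c) : (PySem.List.max? xs (fun x => x)).getD 0 = c := by
  have hne : xs ≠ [] := by
    intro h; subst h; exact absurd ((hmem a).2 (Or.inl rfl)) (by simp)
  obtain ⟨m, hm⟩ : ∃ m, PySem.List.max? xs (fun x => x) = some m := by
    rcases h : PySem.List.max? xs (fun x => x) with _ | m
    · exact absurd ((PySem.List.max?_eq_none_iff _ _).1 h) hne
    · exact ⟨m, rfl⟩
  have hmmem := PySem.List.max?_mem hm
  have hmax := PySem.List.max?_isMax hm
  have hmc := hmax c ((hmem c).2 (Or.inr (Or.inr rfl)))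
  rcases (hmem m).1 hmmem with rfl | rfl | rfl <;> simp [hm] <;> omega

theorem pv_discard_sublist (s : List Int) (x : Int) : (PySem.Set.discard s x).Sublist s := by
  simp [PySem.Set.discard]

theorem pv_ofList_sublist (xs : List Int) : (PySem.Set.ofList xs).Sublist xs := by
  induction xs with
  | nil => simp [PySem.Set.ofList_nil]
  | cons x t ih =>
    rw [PySem.Set.ofList_cons]
    exact List.Sublist.cons₂ x ((pv_discard_sublist _ _).trans ih)

theorem pv_nodup_of_ofList_length (xs : List Int)
    (h : xs.length = (PySem.Set.ofList xs).length) : xs.Nodup := by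
  have he : PySem.Set.ofList xs = xs := (pv_ofList_sublist xs).eq_of_length h.symm
  have hn := PySem.Set.nodup_ofList (xs := xs)
  rwa [he] at hn

theorem pv_nodup_foldl_set {α : Type} (f : PySem.Set Int → α → PySem.Set Int)
    (hf : ∀ acc x, acc.Nodup → (f acc x).Nodup) :
    ∀ (l : List α) (acc : PySem.Set Int), acc.Nodup → (l.foldl f acc).Nodup := by
  intro l
  induction l with
  | nil => intro acc h; simpa using h
  | cons x t ih => intro acc h; exact ih _ (hf _ _ h)

theorem pv_nodup_possible (l : List Int) (lo hi : Int) :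
    ((PySem.List.pyRange lo hi 1).foldl (fun acc start =>
        let consecutive : PySem.Set Int := PySem.Set.ofList (PySem.List.pyRange start (start + 5) 1)
        (PySem.List.pyRange start (start + 5) 1).foldl (fun acc i =>
          let potential := PySem.Set.diff consecutive [i]
          if l.length == 3 && PySem.Set.issubset (PySem.Set.ofList l) potential then
            consecutive.foldl (fun acc num =>
              if !(l.contains num) then
                if num ≤ 14 then PySem.Set.add acc num else acc
              else acc) acc
          else acc) acc) PySem.Set.empty).Nodup := by
  refine pv_nodup_foldl_set _ ?_ _ _ (by simp [PySem.Set.empty])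
  intro acc start hacc
  refine pv_nodup_foldl_set _ ?_ _ _ hacc
  intro acc2 i hacc2
  simp only []
  split_ifs with hc
  · refine pv_nodup_foldl_set _ ?_ _ _ hacc2
    intro acc3 num hacc3
    split_ifs with h1 h2
    · exact PySem.Set.nodup_add _ _ hacc3
    · exact hacc3
    · exact hacc3
  · exact hacc2

theorem pv_degenerate (l : List Int) (h : l.length ≠ 3) (lo hi : Int) :
    ((PySem.List.pyRange lo hi 1).foldl (fun acc start =>
        let consecutive : PySem.Set Int := PySem.Set.ofList (PySem.List.pyRange start (start + 5) 1)
        (PySem.List.pyRange start (start + 5) 1).foldl (fun acc i =>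
          let potential := PySem.Set.diff consecutive [i]
          if l.length == 3 && PySem.Set.issubset (PySem.Set.ofList l) potential then
            consecutive.foldl (fun acc num =>
              if !(l.contains num) then
                if num ≤ 14 then PySem.Set.add acc num else acc
              else acc) acc
          else acc) acc) PySem.Set.empty) = [] := by
  have hbe : (l.length == 3) = false := by simp [h]
  simp only [hbe, Bool.false_and, Bool.false_eq_true, if_false, PySem.List.foldl_ignore]
  rfl

theorem pv_interval (a b c n : Int) (hab : a < b) (hbc : b < c) (hspan : c - a ≤ 4) :
    (∃ start, (a - 3 ≤ start ∧ start < c + 1) ∧ (start ≤ a ∧ c < start + 5) ∧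
      (start ≤ n ∧ n < start + 5)) ↔ (c - 4 ≤ n ∧ n < a + 5) := by
  constructor
  · rintro ⟨s, ⟨_, _⟩, ⟨_, _⟩, ⟨_, _⟩⟩; omega
  · intro h
    rcases le_total (n - 4) (c - 4) with hc | hc
    · exact ⟨c - 4, ⟨by omega, by omega⟩, ⟨by omega, by omega⟩, by omega, by omega⟩
    · exact ⟨n - 4, ⟨by omega, by omega⟩, ⟨by omega, by omega⟩, by omega, by omega⟩

theorem pv_main : ∀ (xs : List Int), xs ≠ [] →
    one_card_straightdraw xs = one_card_straightdraw_alt xs := by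
  intro xs hpre
  unfold one_card_straightdraw one_card_straightdraw_alt
  by_cases hdup : xs.length = (PySem.Set.ofList xs).length
  · have hnd := pv_nodup_of_ofList_length xs hdup
    have hself : PySem.Set.ofList xs = xs := (pv_ofList_sublist xs).eq_of_length hdup.symm
    rw [if_neg (by omega)]
    simp only [hself]
    by_cases h3 : xs.length = 3
    · rw [if_neg (by omega), if_neg (by omega)]
      have hperm : (PySem.List.sorted xs (fun x => x) false).Perm xs := PySem.List.sorted_perm xs (fun x => x) false
      have hlenL : (PySem.List.sorted xs (fun x => x) false).length = 3 := by
        rw [PySem.List.length_sorted]; exact h3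
      obtain ⟨a, b, c, habc⟩ : ∃ a b c, PySem.List.sorted xs (fun x => x) false = [a, b, c] := by
        rcases hL : PySem.List.sorted xs (fun x => x) false with _ | ⟨a, _ | ⟨b, _ | ⟨c, _ | ⟨d, t⟩⟩⟩⟩ <;>
          simp [hL] at hlenL
        exact ⟨a, b, c, rfl⟩
      have hpw : (PySem.List.sorted xs (fun x => x) false).Pairwise (fun p q => p ≤ q) := by
        simpa using PySem.List.sorted_pairwise xs (fun x => x)
      have hndL : (PySem.List.sorted xs (fun x => x) false).Nodup := hperm.nodup_iff.2 hnd
      rw [habc] at hpw hndL hperm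
      simp only [List.pairwise_cons, List.mem_cons, List.nodup_cons] at hpw hndL
      have hab : a < b := by
        obtain ⟨h1, -⟩ := hpw; obtain ⟨g1, -⟩ := hndL
        have := h1 b (Or.inl rfl)
        have : a ≠ b := fun h => g1 (Or.inl h)
        omega
      have hbc : b < c := by
        obtain ⟨-, h2, -⟩ := hpw; obtain ⟨-, g2, -⟩ := hndL
        have := h2 c (Or.inl rfl)
        have : b ≠ c := fun h => g2 (Or.inl h)
        omega
      have hmem : ∀ y, y ∈ xs ↔ y = a ∨ y = b ∨ y = c := fun y => by
        rw [← hperm.mem_iff]; simp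
      rw [habc]
      have e1 : (PySem.List.min? ([a, b, c] : List Int) (fun x => x)).getD 0 = a :=
        pv_min_getD _ (fun y => by simp) hab hbc
      have e2 : (PySem.List.max? ([a, b, c] : List Int) (fun x => x)).getD 0 = c :=
        pv_max_getD _ (fun y => by simp) hab hbc
      have e3 : (PySem.List.min? xs (fun x => x)).getD 0 = a := pv_min_getD _ hmem hab hbc
      have e4 : (PySem.List.max? xs (fun x => x)).getD 0 = c := pv_max_getD _ hmem hab hbc
      simp only [e1, e2, e3, e4]
      have hcn : ∀ m : Int, (PySem.Set.contains xs m = false) ↔ m ∉ xs := by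
        intro m
        constructor
        · intro h hm
          rw [(PySem.Set.contains_iff xs m).2 hm] at h
          simp at h
        · intro h
          cases hc : PySem.Set.contains xs m
          · rfl
          · exact absurd ((PySem.Set.contains_iff xs m).1 hc) h
      by_cases hspan : c - a > 4
      · rw [if_pos hspan]
        have hemp : ((PySem.List.pyRange (a - 3) (c + 1) 1).foldl (fun acc start =>
            let consecutive : PySem.Set Int := PySem.Set.ofList (PySem.List.pyRange start (start + 5) 1)
            (PySem.List.pyRange start (start + 5) 1).foldl (fun acc i =>
              let potential := PySem.Set.diff consecutive [i]
              if ([a, b, c] : List Int).length == 3 && PySem.Set.issubset (PySem.Set.ofList [a, b, c]) potential then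
                consecutive.foldl (fun acc num =>
                  if !(([a, b, c] : List Int).contains num) then
                    if num ≤ 14 then PySem.Set.add acc num else acc
                  else acc) acc
              else acc) acc) PySem.Set.empty) = [] := by
          refine List.eq_nil_iff_forall_not_mem.2 (fun n hn => ?_)
          rw [pv_mem_possible a b c (a - 3) (c + 1) n hab hbc] at hn
          obtain ⟨st, -, ⟨u1, u2⟩, -⟩ := hn
          omega
        rw [hemp]
        simp [PySem.List.sorted_eq_nil_iff]
      · rw [if_neg hspan]
        refine PySem.List.sorted_eq_of_perm_of_pairwise_lt _ _ _ ?_ ?_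
        · refine (List.perm_ext_iff_of_nodup ?_ (pv_nodup_possible _ _ _)).2 ?_
          · exact (List.Pairwise.filter _ (PySem.List.pairwise_lt_pyRange_one _ _)).nodup
          · intro n
            rw [List.mem_filter, pv_mem_possible a b c (a - 3) (c + 1) n hab hbc,
                PySem.List.mem_pyRange_one]
            constructor
            · rintro ⟨hr, hp⟩
              simp only [Bool.and_eq_true, Bool.not_eq_eq_eq_not, decide_eq_true_eq] at hp
              obtain ⟨st, u1, u2, u3⟩ :=
                (pv_interval a b c n hab hbc (by omega)).2 hr
              exact ⟨st, u1, u2, u3.1, u3.2, by rw [← hmem]; exact (hcn n).1 hp.1, hp.2⟩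
            · rintro ⟨st, u1, u2, u3, u4, u5, u6⟩
              refine ⟨(pv_interval a b c n hab hbc (by omega)).1 ⟨st, u1, u2, u3, u4⟩, ?_⟩
              simp only [Bool.and_eq_true, Bool.not_eq_eq_eq_not, decide_eq_true_eq]
              exact ⟨(hcn n).2 (by rw [hmem]; exact u5), u6⟩
        · simpa using List.Pairwise.filter _ (PySem.List.pairwise_lt_pyRange_one (c - 4) (a + 5))
    · rw [if_pos h3]
      have hl3 : (PySem.List.sorted xs (fun x => x) false).length ≠ 3 := by
        rw [PySem.List.length_sorted]; exact h3
      simp only [pv_degenerate _ hl3, PySem.List.sorted_eq_nil_iff]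
  · rw [if_pos (by omega)]
    by_cases h3 : xs.length = 3
    · rw [if_neg (by omega), if_pos (by omega)]
    · rw [if_pos h3]

-- ===== VERDICT (by name: the statement is the Claim_ definition above) =====
theorem one_card_straightdraw_spec : Claim_equal_one_card_straightdraw := by
  intro xs _ hpre
  unfold Spec_one_card_straightdraw
  exact pv_main xs hpre
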